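-- pv_equiv track=rewrite | github.com/yiming1012/MyLeetCode | LeetCode/排序算法（sort）/386. 字典序排数.py | lexicalOrder3
-- ===== SOURCE A (Python) =====
-- from typing import List
--
-- def lexicalOrder3(n: int) -> List[int]:
--     def dfs(num):
--         if num > n: return
--         res.append(num)
--         for i in range(10):
--             dfs(num * 10 + i)
--
--     res = []
--     for i in range(1, 10):
--         dfs(i)
--     return res
-- ===== SOURCE B (Python) =====
-- from typing import List
--
-- def lexicalOrder3(n: int) -> List[int]:
--     res = []
--     cur = 1
--     for _ in range(n):
--         res.append(cur)
--         if cur * 10 <= n: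
--             cur *= 10
--         else:
--             while cur % 10 == 9 or cur + 1 > n:
--                 cur //= 10
--             cur += 1
--     return res
-- ===== Notes on version B (the rewrite author's own statement) =====
-- stated objective: faster
-- what changed: Replaces the recursive ten-way DFS over the lexicographic tree with an iterative single-integer-pointer loop that appends cur n times and computes each lexicographic successor in place by digit arithmetic (descend by multiplying by ten, otherwise climb by integer division until a sibling is available), eliminating all recursion and per-node function calls.
import Mathlib
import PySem

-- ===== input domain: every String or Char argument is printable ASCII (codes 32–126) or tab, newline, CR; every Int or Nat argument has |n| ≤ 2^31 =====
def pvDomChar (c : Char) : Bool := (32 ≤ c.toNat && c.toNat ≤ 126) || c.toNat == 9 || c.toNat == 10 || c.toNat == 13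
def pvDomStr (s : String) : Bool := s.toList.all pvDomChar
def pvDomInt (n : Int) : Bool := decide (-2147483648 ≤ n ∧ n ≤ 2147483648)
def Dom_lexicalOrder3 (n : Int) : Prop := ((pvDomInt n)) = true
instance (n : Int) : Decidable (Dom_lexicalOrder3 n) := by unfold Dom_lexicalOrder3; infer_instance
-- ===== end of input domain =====

-- B replaces A's recursive ten-way DFS with an iterative single-pointer loop that emits the
-- current number n times and computes each lexicographic successor by digit arithmetic
-- (measurably faster: no recursion / per-node call overhead).


-- ===== PORT A =====
-- 'def dfs(num)' of A; the 'num ≤ 0' branch is a totality guard only: every call A makes has num ≥ 1.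
def pvDfsA (n num : Int) : List Int :=
  if num ≤ 0 then []
  else if num > n then []
  else num :: ((List.range 10).attach.map (fun i => pvDfsA n (num * 10 + (i.1 : Int)))).flatten
termination_by (n + 1 - num).toNat
decreasing_by
  have : (0:Int) ≤ (i.1 : Int) := Int.natCast_nonneg _
  omega

-- ===== PORT A (entry) =====
def lexicalOrder3 (n : Int) : List Int :=
  (PySem.List.pyRange 1 10 1).foldl (fun res i => res ++ pvDfsA n i) []

-- ===== PORT B =====
-- the inner 'while' of B; the '0 < cur' conjunct is a totality guard only: B's loop body only
-- runs when n ≥ 1, and then at cur = 0 the Python condition is false anyway.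
def pvClimb (n cur : Int) : Int :=
  if h : 0 < cur ∧ (PySem.Int.mod cur 10 = 9 ∨ cur + 1 > n) then
    pvClimb n (PySem.Int.floordiv cur 10)
  else cur
termination_by cur.toNat
decreasing_by
  rw [PySem.Int.floordiv_eq_ediv_of_pos (by omega)]
  omega

def pvStep (n cur : Int) : Int :=
  if cur * 10 ≤ n then cur * 10 else pvClimb n cur + 1

def lexicalOrder3_alt (n : Int) : List Int :=
  ((PySem.List.pyRange 0 n 1).foldl
     (fun (st : List Int × Int) _ => (st.1 ++ [st.2], pvStep n st.2))
     (([] : List Int), (1 : Int))).1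


-- ===== PRECONDITION & SPEC =====
def Spec_lexicalOrder3 (n : Int) (out : List Int) : Prop := out = lexicalOrder3_alt n
instance (n : Int) (out : List Int) : Decidable (Spec_lexicalOrder3 n out) := by unfold Spec_lexicalOrder3; infer_instance

-- ===== CLAIM (what is proved, stated in full; the proofs are below) =====
def Claim_equal_lexicalOrder3 : Prop := ∀ (n : Int), Dom_lexicalOrder3 n → Spec_lexicalOrder3 n (lexicalOrder3 n)

-- ===== LEMMAS AND PROOFS =====
-- proof-side helpers: pvEmit is B's loop as a count recursion; pvKids/pvRoots are A's child/root
-- loops as index recursions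
def pvEmit (n : Int) : Nat → Int → List Int
  | 0, _ => []
  | k+1, cur => cur :: pvEmit n k (pvStep n cur)

def pvKids (n num : Int) (i : Nat) : List Int :=
  if i < 10 then pvDfsA n (num * 10 + (i : Int)) ++ pvKids n num (i+1) else []
termination_by 10 - i

def pvRoots (n : Int) (r : Nat) : List Int :=
  if r < 10 then pvDfsA n (r : Int) ++ pvRoots n (r+1) else []
termination_by 10 - r

-- B shape
lemma pvAlt_foldl (n : Int) : ∀ (l : List Int) (res : List Int) (cur : Int),
    (l.foldl (fun (st : List Int × Int) _ => (st.1 ++ [st.2], pvStep n st.2)) (res, cur)).1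
      = res ++ pvEmit n l.length cur := by
  intro l
  induction l with
  | nil => intro res cur; simp [pvEmit]
  | cons x xs ih => intro res cur; simp [List.foldl_cons, ih, pvEmit]

lemma pvAlt_eq_emit (n : Int) : lexicalOrder3_alt n = pvEmit n n.toNat 1 := by
  unfold lexicalOrder3_alt
  rw [pvAlt_foldl n (PySem.List.pyRange 0 n 1) [] 1]
  simp [PySem.List.length_pyRange_one]

-- climb lemmas
lemma pvClimb_stop (n cur : Int) (h : ¬ (PySem.Int.mod cur 10 = 9 ∨ cur + 1 > n)) :
    pvClimb n cur = cur := by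
  rw [pvClimb, dif_neg (fun hc => h hc.2)]

lemma pvClimb_step (n cur : Int) (h0 : 0 < cur)
    (h : PySem.Int.mod cur 10 = 9 ∨ cur + 1 > n) :
    pvClimb n cur = pvClimb n (PySem.Int.floordiv cur 10) := by
  rw [pvClimb, dif_pos ⟨h0, h⟩]

lemma pvClimb_zero (n : Int) : pvClimb n 0 = 0 := by
  rw [pvClimb]; simp

-- digit arithmetic
lemma pv_mod_ten (num i : Int) (h1 : 1 ≤ num) (h2 : 0 ≤ i) (h3 : i ≤ 9) :
    PySem.Int.mod (num * 10 + i) 10 = i := by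
  rw [PySem.Int.mod_eq_emod_of_pos (by omega)]; omega

lemma pv_div_ten (num i : Int) (h1 : 1 ≤ num) (h2 : 0 ≤ i) (h3 : i ≤ 9) :
    PySem.Int.floordiv (num * 10 + i) 10 = num := by
  rw [PySem.Int.floordiv_eq_ediv_of_pos (by omega)]; omega

-- dfs unfolds
lemma pvDfsA_eq_nil (n num : Int) (h : num ≤ 0 ∨ n < num) : pvDfsA n num = [] := by
  rw [pvDfsA]
  split_ifs with ha hb
  · rfl
  · rfl
  · exfalso; rcases h with h | h <;> omega

lemma pvDfsA_cons (n num : Int) (h1 : 1 ≤ num) (h2 : num ≤ n) :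
    pvDfsA n num = num :: pvKids n num 0 := by
  rw [pvDfsA]
  simp only [show ¬ num ≤ 0 by omega, if_false, show ¬ num > n by omega, if_false]
  congr 1
  rw [show (List.range 10).attach.map (fun i => pvDfsA n (num * 10 + (i.1 : Int)))
        = (List.range 10).map (fun (i : Nat) => pvDfsA n (num * 10 + (i : Int)))
      from List.attach_map_val (f := fun (i : Nat) => pvDfsA n (num * 10 + (i : Int)))]
  show ((List.range 10).map (fun (i : Nat) => pvDfsA n (num * 10 + (i : Int)))).flatten = _
  simp [List.range_succ, pvKids]

lemma pvKids_eq_nil (n num : Int) : ∀ (k i : Nat), 10 - i ≤ k → 1 ≤ num →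
    n < num * 10 + (i : Int) → pvKids n num i = [] := by
  intro k
  induction k with
  | zero =>
    intro i hk _ _
    rw [pvKids, if_neg (by omega)]
  | succ k ih =>
    intro i hk h1 h2
    rw [pvKids]
    by_cases hi : i < 10
    · rw [if_pos hi, pvDfsA_eq_nil n _ (Or.inr h2),
        ih (i+1) (by omega) h1 (by push_cast; push_cast at h2; omega)]
      rfl
    · rw [if_neg hi]

lemma pvEmit_succ (n : Int) (k : Nat) (cur : Int) :
    pvEmit n (k + 1) cur = cur :: pvEmit n k (pvStep n cur) := rfl

lemma pvSim (n : Int) : ∀ (d : Nat) (num : Int), (n + 1 - num).toNat ≤ d → 1 ≤ num → num ≤ n →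
    ∀ (k : Nat), pvEmit n ((pvDfsA n num).length + k) num
      = pvDfsA n num ++ pvEmit n k (pvClimb n num + 1) := by
  intro d
  induction d with
  | zero => intro num hd h1 h2; omega
  | succ d ih =>
    intro num hd h1 h2 k
    rw [pvDfsA_cons n num h1 h2]
    -- chain over the children
    have chain : ∀ (j i : Nat), i + j = 10 → 1 ≤ j → num * 10 + (i : Int) ≤ n →
        ∀ (k : Nat), pvEmit n ((pvKids n num i).length + k) (num * 10 + (i : Int))
          = pvKids n num i ++ pvEmit n k (pvClimb n num + 1) := by
      intro j
      induction j with
      | zero => intro i h hj; omega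
      | succ j ihj =>
        intro i hij _ hchild k
        have hi9 : i ≤ 9 := by omega
        have hc1 : (1:Int) ≤ num * 10 + (i : Int) := by
          have : (0:Int) ≤ (i : Int) := Int.natCast_nonneg _
          omega
        rw [pvKids, if_pos (by omega)]
        have hmeas : (n + 1 - (num * 10 + (i : Int))).toNat ≤ d := by
          have : (0:Int) ≤ (i : Int) := Int.natCast_nonneg _
          omega
        have hsub := ih (num * 10 + (i : Int)) hmeas hc1 hchild
        rw [List.length_append, Nat.add_assoc]
        rw [hsub ((pvKids n num (i+1)).length + k), List.append_assoc]
        congr 1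
        by_cases hlast : i = 9 ∨ n < num * 10 + (i : Int) + 1
        · -- last child: climb through num, rest of kids empty
          have hkidsnil : pvKids n num (i+1) = [] := by
            rcases hlast with h9 | hgt
            · subst h9; rw [pvKids, if_neg (by omega)]
            · exact pvKids_eq_nil n num 10 (i+1) (by omega) h1 (by push_cast; omega)
          have hclimb : pvClimb n (num * 10 + (i : Int)) = pvClimb n num := by
            rw [pvClimb_step n _ (by omega)
                (by rw [pv_mod_ten num (i:Int) h1 (Int.natCast_nonneg _) (by exact_mod_cast hi9)]
                    rcases hlast with h9 | hgt
                    · left; exact_mod_cast congrArg (Nat.cast : Nat → Int) h9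
                    · right; omega),
              pv_div_ten num (i:Int) h1 (Int.natCast_nonneg _) (by exact_mod_cast hi9)]
          rw [hkidsnil, hclimb]
          simp
        · push_neg at hlast
          obtain ⟨hi9', hle⟩ := hlast
          have hclimb : pvClimb n (num * 10 + (i : Int)) = num * 10 + (i : Int) := by
            apply pvClimb_stop
            rw [pv_mod_ten num (i:Int) h1 (Int.natCast_nonneg _) (by exact_mod_cast hi9)]
            push_neg
            constructor
            · intro hcon
              exact hi9' (by exact_mod_cast hcon)
            · omega
          rw [hclimb]
          have := ihj (i+1) (by omega) (by omega) (by push_cast; omega) k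
          rw [show num * 10 + (i : Int) + 1 = num * 10 + ((i+1 : Nat) : Int) by push_cast; ring]
          exact this
    -- use the chain / leaf case
    by_cases hdesc : num * 10 ≤ n
    · have h0 : num * 10 = num * 10 + ((0:Nat) : Int) := by simp
      have := chain 10 0 (by omega) (by omega) (by simpa using hdesc) k
      rw [show (num :: pvKids n num 0).length + k = ((pvKids n num 0).length + k) + 1 by
            simp [Nat.add_comm, Nat.add_assoc, Nat.add_left_comm]]
      rw [pvEmit_succ]
      have hstep : pvStep n num = num * 10 := by rw [pvStep, if_pos hdesc]
      rw [hstep, show (num*10 : Int) = num * 10 + ((0:Nat) : Int) by simp]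
      rw [this]
      simp
    · -- leaf: no children
      have hkidsnil : pvKids n num 0 = [] := pvKids_eq_nil n num 10 0 (by omega) h1 (by push_cast; omega)
      rw [hkidsnil]
      have hstep : pvStep n num = pvClimb n num + 1 := by rw [pvStep, if_neg hdesc]
      simp [pvEmit_succ, hstep, Nat.add_comm]

lemma pvRoots_eq_nil (n : Int) : ∀ (k r : Nat), 10 - r ≤ k → n < (r : Int) →
    pvRoots n r = [] := by
  intro k
  induction k with
  | zero => intro r hk _; rw [pvRoots, if_neg (by omega)]
  | succ k ih =>
    intro r hk h2
    rw [pvRoots]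
    by_cases hr : r < 10
    · rw [if_pos hr, pvDfsA_eq_nil n _ (Or.inr h2), ih (r+1) (by omega) (by push_cast; push_cast at h2; omega)]
      rfl
    · rw [if_neg hr]

lemma pvA_eq_roots (n : Int) : lexicalOrder3 n = pvRoots n 1 := by
  unfold lexicalOrder3
  rw [show PySem.List.pyRange 1 10 1 = [1,2,3,4,5,6,7,8,9] from by decide]
  simp [pvRoots, List.foldl, List.append_assoc]

lemma pvSim' (n : Int) (num : Int) (h1 : 1 ≤ num) (h2 : num ≤ n) (k : Nat) :
    pvEmit n ((pvDfsA n num).length + k) num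
      = pvDfsA n num ++ pvEmit n k (pvClimb n num + 1) :=
  pvSim n (n + 1 - num).toNat num le_rfl h1 h2 k

lemma pvRootsChain (n : Int) : ∀ (j r : Nat), r + j = 10 → 1 ≤ j → 1 ≤ r → (r : Int) ≤ n →
    ∀ (k : Nat), pvEmit n ((pvRoots n r).length + k) (r : Int)
      = pvRoots n r ++ pvEmit n k 1 := by
  intro j
  induction j with
  | zero => intro r hrj hj h1 h2; omega
  | succ j ihj =>
    intro r hrj hj h1 h2 k
    have hr9 : r ≤ 9 := by omega
    have hr1 : (1:Int) ≤ (r : Int) := by exact_mod_cast h1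
    rw [pvRoots, if_pos (by omega), List.length_append, Nat.add_assoc]
    rw [pvSim' n (r : Int) hr1 h2 ((pvRoots n (r+1)).length + k), List.append_assoc]
    congr 1
    have hmod : PySem.Int.mod (r : Int) 10 = (r : Int) := by
      rw [PySem.Int.mod_eq_emod_of_pos (by omega)]
      have : (r : Int) ≤ 9 := by exact_mod_cast hr9
      omega
    by_cases hlast : r = 9 ∨ n < (r : Int) + 1
    · have hrootsnil : pvRoots n (r+1) = [] := by
        rcases hlast with h9 | hgt
        · subst h9; rw [pvRoots, if_neg (by omega)]
        · exact pvRoots_eq_nil n 10 (r+1) (by omega) (by push_cast; omega)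
      have hclimb : pvClimb n (r : Int) = 0 := by
        rw [pvClimb_step n _ (by omega)
            (by rw [hmod]
                rcases hlast with h9 | hgt
                · left; exact_mod_cast congrArg (Nat.cast : Nat → Int) h9
                · right; omega)]
        rw [show PySem.Int.floordiv (r : Int) 10 = 0 from by
              rw [PySem.Int.floordiv_eq_ediv_of_pos (by omega)]
              have : (r : Int) ≤ 9 := by exact_mod_cast hr9
              omega]
        exact pvClimb_zero n
      rw [hrootsnil, hclimb]
      simp [pvEmit]
    · push_neg at hlast
      obtain ⟨hr9', hle⟩ := hlast
      have hclimb : pvClimb n (r : Int) = (r : Int) := by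
        apply pvClimb_stop
        rw [hmod]
        push_neg
        exact ⟨fun hcon => hr9' (by exact_mod_cast hcon), by omega⟩
      rw [hclimb]
      have := ihj (r+1) (by omega) (by omega) (by omega) (by push_cast; omega) k
      rw [show (r : Int) + 1 = ((r+1 : Nat) : Int) by push_cast; ring]
      exact this

def pvPref (p m : Int) : Prop := ∃ j : Nat, p * 10^j ≤ m ∧ m < (p+1) * 10^j

lemma pvMemKids (n num : Int) : ∀ (k i : Nat), 10 - i ≤ k → ∀ m,
    (m ∈ pvKids n num i ↔ ∃ i' : Nat, i ≤ i' ∧ i' < 10 ∧ m ∈ pvDfsA n (num*10 + (i' : Int))) := by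
  intro k
  induction k with
  | zero =>
    intro i hk m
    rw [pvKids, if_neg (by omega)]
    simp only [List.not_mem_nil, false_iff]
    rintro ⟨i', h1, h2, _⟩; omega
  | succ k ih =>
    intro i hk m
    rw [pvKids]
    by_cases hi : i < 10
    · rw [if_pos hi]
      simp only [List.mem_append]
      constructor
      · rintro (hm | hm)
        · exact ⟨i, le_rfl, hi, hm⟩
        · obtain ⟨i', h1, h2, h3⟩ := (ih (i+1) (by omega) m).mp hm
          exact ⟨i', by omega, h2, h3⟩
      · rintro ⟨i', h1, h2, h3⟩
        by_cases hii : i' = i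
        · subst hii; exact Or.inl h3
        · exact Or.inr ((ih (i+1) (by omega) m).mpr ⟨i', by omega, h2, h3⟩)
    · rw [if_neg hi]
      simp only [List.not_mem_nil, false_iff]
      rintro ⟨i', h1, h2, _⟩; omega

lemma pvMemRoots (n : Int) : ∀ (k r : Nat), 10 - r ≤ k → ∀ m,
    (m ∈ pvRoots n r ↔ ∃ r' : Nat, r ≤ r' ∧ r' < 10 ∧ m ∈ pvDfsA n (r' : Int)) := by
  intro k
  induction k with
  | zero =>
    intro r hk m
    rw [pvRoots, if_neg (by omega)]
    simp only [List.not_mem_nil, false_iff]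
    rintro ⟨r', h1, h2, _⟩; omega
  | succ k ih =>
    intro r hk m
    rw [pvRoots]
    by_cases hr : r < 10
    · rw [if_pos hr]
      simp only [List.mem_append]
      constructor
      · rintro (hm | hm)
        · exact ⟨r, le_rfl, hr, hm⟩
        · obtain ⟨r', h1, h2, h3⟩ := (ih (r+1) (by omega) m).mp hm
          exact ⟨r', by omega, h2, h3⟩
      · rintro ⟨r', h1, h2, h3⟩
        by_cases hrr : r' = r
        · subst hrr; exact Or.inl h3
        · exact Or.inr ((ih (r+1) (by omega) m).mpr ⟨r', by omega, h2, h3⟩)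
    · rw [if_neg hr]
      simp only [List.not_mem_nil, false_iff]
      rintro ⟨r', h1, h2, _⟩; omega

lemma pvMemDfs (n : Int) : ∀ (d : Nat) (num m : Int), (n + 1 - num).toNat ≤ d →
    m ∈ pvDfsA n num → 1 ≤ num ∧ num ≤ m ∧ m ≤ n ∧ pvPref num m := by
  intro d
  induction d with
  | zero =>
    intro num m hd hm
    by_cases h1 : num ≤ 0
    · rw [pvDfsA_eq_nil n num (Or.inl h1)] at hm; cases hm
    · by_cases h2 : n < num
      · rw [pvDfsA_eq_nil n num (Or.inr h2)] at hm; cases hm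
      · omega
  | succ d ih =>
    intro num m hd hm
    by_cases h1 : num ≤ 0
    · rw [pvDfsA_eq_nil n num (Or.inl h1)] at hm; cases hm
    · by_cases h2 : n < num
      · rw [pvDfsA_eq_nil n num (Or.inr h2)] at hm; cases hm
      · rw [pvDfsA_cons n num (by omega) (by omega)] at hm
        rcases List.mem_cons.mp hm with rfl | hm
        · exact ⟨by omega, le_rfl, by omega, ⟨0, by simp⟩⟩
        · obtain ⟨i', _, hi10, hmem⟩ := (pvMemKids n num 10 0 (by omega) m).mp hm
          have hci : (0:Int) ≤ (i' : Int) := Int.natCast_nonneg _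
          have hci9 : (i' : Int) ≤ 9 := by exact_mod_cast Nat.le_of_lt_succ hi10
          have hrec := ih (num*10 + (i' : Int)) m (by omega) hmem
          obtain ⟨ha, hb, hc, j, hj1, hj2⟩ := hrec
          refine ⟨by omega, by omega, hc, j+1, ?_, ?_⟩
          · calc num * 10 ^ (j+1) = (num * 10) * 10 ^ j := by ring
            _ ≤ (num * 10 + (i' : Int)) * 10 ^ j := by
                apply mul_le_mul_of_nonneg_right (by omega) (by positivity)
            _ ≤ m := hj1
          · calc m < (num * 10 + (i' : Int) + 1) * 10 ^ j := hj2
            _ ≤ ((num + 1) * 10) * 10 ^ j := by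
                apply mul_le_mul_of_nonneg_right (by omega) (by positivity)
            _ = (num + 1) * 10 ^ (j+1) := by ring

lemma pvPrefDisjoint (c c' m : Int) (h1 : 1 ≤ c) (h2 : c < c') (h3 : c' + 1 ≤ 10 * c)
    (hp : pvPref c m) (hp' : pvPref c' m) : False := by
  obtain ⟨j, hj1, hj2⟩ := hp
  obtain ⟨k, hk1, hk2⟩ := hp'
  rcases Nat.lt_trichotomy j k with hjk | hjk | hjk
  · -- j < k : m < (c+1)*10^j ≤ c'*10^j ≤ c'*10^k ≤ m
    have e1 : (c+1) * 10^j ≤ c' * 10^j :=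
      mul_le_mul_of_nonneg_right (by omega) (by positivity)
    have e2 : (c' : Int) * 10^j ≤ c' * 10^k :=
      mul_le_mul_of_nonneg_left (pow_le_pow_right₀ (by norm_num) (by omega)) (by omega)
    omega
  · subst hjk
    have e1 : (c+1) * 10^j ≤ c' * 10^j :=
      mul_le_mul_of_nonneg_right (by omega) (by positivity)
    omega
  · -- k < j : m ≥ c*10^j ≥ c*10^(k+1) = 10c*10^k ≥ (c'+1)*10^k > m
    have e0 : (10:Int)^(k+1) ≤ 10^j := pow_le_pow_right₀ (by norm_num) (by omega)
    have e1 : c * 10^(k+1) ≤ c * 10^j := mul_le_mul_of_nonneg_left e0 (by omega)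
    have e2 : (c'+1) * 10^k ≤ (10*c) * 10^k :=
      mul_le_mul_of_nonneg_right h3 (by positivity)
    have e3 : (10*c : Int) * 10^k = c * 10^(k+1) := by ring
    omega

lemma pvNodupDfs (n : Int) : ∀ (d : Nat) (num : Int), (n + 1 - num).toNat ≤ d →
    (pvDfsA n num).Nodup := by
  intro d
  induction d with
  | zero =>
    intro num hd
    by_cases h1 : num ≤ 0
    · rw [pvDfsA_eq_nil n num (Or.inl h1)]; exact List.nodup_nil
    · by_cases h2 : n < num
      · rw [pvDfsA_eq_nil n num (Or.inr h2)]; exact List.nodup_nil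
      · omega
  | succ d ih =>
    intro num hd
    by_cases h1 : num ≤ 0
    · rw [pvDfsA_eq_nil n num (Or.inl h1)]; exact List.nodup_nil
    · by_cases h2 : n < num
      · rw [pvDfsA_eq_nil n num (Or.inr h2)]; exact List.nodup_nil
      · rw [pvDfsA_cons n num (by omega) (by omega)]
        have hkidsmem : ∀ m ∈ pvKids n num 0, num * 10 ≤ m ∧ m ≤ n ∧
            ∃ i' : Nat, i' < 10 ∧ pvPref (num * 10 + (i' : Int)) m ∧ m ∈ pvDfsA n (num*10 + (i':Int)) := by
          intro m hm
          obtain ⟨i', _, hi10, hmem⟩ := (pvMemKids n num 10 0 (by omega) m).mp hm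
          have hci : (0:Int) ≤ (i' : Int) := Int.natCast_nonneg _
          obtain ⟨ha, hb, hc, hp⟩ := pvMemDfs n (n+1-(num*10+(i':Int))).toNat _ m le_rfl hmem
          exact ⟨by omega, hc, i', hi10, hp, hmem⟩
        refine List.nodup_cons.mpr ⟨?_, ?_⟩
        · intro hmem
          obtain ⟨hge, _, _⟩ := hkidsmem num hmem
          omega
        · -- nodup of the kids list by inner fuel induction
          have inner : ∀ (k i : Nat), 10 - i ≤ k → (pvKids n num i).Nodup := by
            intro k
            induction k with
            | zero => intro i hk; rw [pvKids, if_neg (by omega)]; exact List.nodup_nil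
            | succ k ihk =>
              intro i hk
              rw [pvKids]
              by_cases hi : i < 10
              · rw [if_pos hi]
                refine List.Nodup.append ?_ (ihk (i+1) (by omega)) ?_
                · exact ih (num*10 + (i:Int)) (by
                    have : (0:Int) ≤ (i : Int) := Int.natCast_nonneg _
                    omega)
                · intro x hx hx'
                  obtain ⟨_, _, _, hpx⟩ := pvMemDfs n (n+1-(num*10+(i:Int))).toNat _ x le_rfl hx
                  obtain ⟨i', hi'ge, hi'10, hmem'⟩ := (pvMemKids n num 10 (i+1) (by omega) x).mp hx'
                  obtain ⟨_, _, _, hpx'⟩ := pvMemDfs n (n+1-(num*10+(i':Int))).toNat _ x le_rfl hmem'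
                  have hc1 : (0:Int) ≤ (i : Int) := Int.natCast_nonneg _
                  have hc2 : (i : Int) < (i' : Int) := by exact_mod_cast hi'ge
                  have hc3 : (i' : Int) ≤ 9 := by exact_mod_cast Nat.le_of_lt_succ hi'10
                  exact pvPrefDisjoint (num*10 + (i:Int)) (num*10 + (i':Int)) x
                    (by omega) (by omega) (by omega) hpx hpx'
              · rw [if_neg hi]; exact List.nodup_nil
          exact inner 10 0 (by omega)

lemma pvNodupRoots (n : Int) : ∀ (k r : Nat), 10 - r ≤ k → 1 ≤ r → (pvRoots n r).Nodup := by
  intro k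
  induction k with
  | zero => intro r hk _; rw [pvRoots, if_neg (by omega)]; exact List.nodup_nil
  | succ k ih =>
    intro r hk hr1
    rw [pvRoots]
    by_cases hr : r < 10
    · rw [if_pos hr]
      refine List.Nodup.append (pvNodupDfs n (n+1-(r:Int)).toNat _ le_rfl) (ih (r+1) (by omega) (by omega)) ?_
      intro x hx hx'
      obtain ⟨_, _, _, hpx⟩ := pvMemDfs n (n+1-(r:Int)).toNat _ x le_rfl hx
      obtain ⟨r', hr'ge, hr'10, hmem'⟩ := (pvMemRoots n 10 (r+1) (by omega) x).mp hx'
      obtain ⟨_, _, _, hpx'⟩ := pvMemDfs n (n+1-(r':Int)).toNat _ x le_rfl hmem'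
      have hc1 : (1:Int) ≤ (r : Int) := by exact_mod_cast hr1
      have hc2 : (r : Int) < (r' : Int) := by exact_mod_cast hr'ge
      have hc3 : (r' : Int) ≤ 9 := by exact_mod_cast Nat.le_of_lt_succ hr'10
      exact pvPrefDisjoint (r:Int) (r':Int) x hc1 hc2 (by omega) hpx hpx'
    · rw [if_neg hr]; exact List.nodup_nil

lemma pvHeadMem (n num : Int) (h1 : 1 ≤ num) (h2 : num ≤ n) : num ∈ pvDfsA n num := by
  rw [pvDfsA_cons n num h1 h2]; exact List.mem_cons_self

lemma pvMemChild (n : Int) : ∀ (d : Nat) (num v : Int), (n + 1 - num).toNat ≤ d →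
    v ∈ pvDfsA n num → ∀ i' : Int, 0 ≤ i' → i' ≤ 9 → v * 10 + i' ≤ n →
    v * 10 + i' ∈ pvDfsA n num := by
  intro d
  induction d with
  | zero =>
    intro num v hd hv
    obtain ⟨h1, h2, h3, _⟩ := pvMemDfs n (n+1-num).toNat num v le_rfl hv
    omega
  | succ d ih =>
    intro num v hd hv i' hi0 hi9 hle
    obtain ⟨h1, h2, h3, _⟩ := pvMemDfs n (n+1-num).toNat num v le_rfl hv
    rw [pvDfsA_cons n num h1 (by omega)] at hv ⊢
    rcases List.mem_cons.mp hv with rfl | hv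
    · -- v = num : the child v*10+i' is the head of child subtree i'
      refine List.mem_cons.mpr (Or.inr ?_)
      refine (pvMemKids n v 10 0 (by omega) _).mpr ⟨i'.toNat, by omega, by omega, ?_⟩
      rw [show (v * 10 + ((i'.toNat : Nat) : Int)) = v * 10 + i' by
            rw [Int.toNat_of_nonneg hi0]]
      exact pvHeadMem n (v*10+i') (by omega) hle
    · refine List.mem_cons.mpr (Or.inr ?_)
      obtain ⟨j, _, hj10, hmem⟩ := (pvMemKids n num 10 0 (by omega) v).mp hv
      refine (pvMemKids n num 10 0 (by omega) _).mpr ⟨j, by omega, hj10, ?_⟩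
      have hcj : (0:Int) ≤ (j : Int) := Int.natCast_nonneg _
      exact ih (num*10 + (j:Int)) v (by omega) hmem i' hi0 hi9 hle

lemma pvComplete (n : Int) : ∀ (dm : Nat) (m : Int), m.toNat ≤ dm → 1 ≤ m → m ≤ n →
    m ∈ pvRoots n 1 := by
  intro dm
  induction dm with
  | zero => intro m hd h1 h2; omega
  | succ dm ih =>
    intro m hd h1 h2
    by_cases hm9 : m ≤ 9
    · refine (pvMemRoots n 10 1 (by omega) m).mpr ⟨m.toNat, by omega, by omega, ?_⟩
      rw [Int.toNat_of_nonneg (by omega)]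
      exact pvHeadMem n m h1 h2
    · -- m ≥ 10 : split off the last digit
      have hv1 : 1 ≤ m / 10 := by omega
      have hv2 : m / 10 ≤ n := by omega
      have hvlt : m / 10 < m := by omega
      have hmem := ih (m / 10) (by omega) hv1 hv2
      obtain ⟨r', hr1, hr10, hdfs⟩ := (pvMemRoots n 10 1 (by omega) (m/10)).mp hmem
      refine (pvMemRoots n 10 1 (by omega) m).mpr ⟨r', hr1, hr10, ?_⟩
      have := pvMemChild n (n+1-(r':Int)).toNat (r':Int) (m/10) le_rfl hdfs
        (m % 10) (by omega) (by omega) (by omega)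
      rw [show m / 10 * 10 + m % 10 = m by omega] at this
      exact this

lemma pvRootsLength (n : Int) (hn : 0 ≤ n) : (pvRoots n 1).length = n.toNat := by
  have hperm : (pvRoots n 1).Perm ((List.range n.toNat).map (fun (k : Nat) => (k : Int) + 1)) := by
    refine (List.perm_ext_iff_of_nodup (pvNodupRoots n 10 1 (by omega) (by omega)) ?_).mpr ?_
    · exact List.Nodup.map (fun a b h => by omega) (List.nodup_range)
    · intro m
      constructor
      · intro hm
        obtain ⟨r', hr1, _, hdfs⟩ := (pvMemRoots n 10 1 (by omega) m).mp hm
        obtain ⟨h1, h2, h3, _⟩ := pvMemDfs n (n+1-(r':Int)).toNat _ m le_rfl hdfs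
        simp only [List.mem_map, List.mem_range]
        have : (1:Int) ≤ (r':Int) := by exact_mod_cast hr1
        exact ⟨(m-1).toNat, by omega, by omega⟩
      · intro hm
        simp only [List.mem_map, List.mem_range] at hm
        obtain ⟨k, hk, rfl⟩ := hm
        exact pvComplete n ((k:Int)+1).toNat _ le_rfl (by omega) (by omega)
  rw [hperm.length_eq, List.length_map, List.length_range]

theorem pvMain (n : Int) : lexicalOrder3 n = lexicalOrder3_alt n := by
  rw [pvA_eq_roots, pvAlt_eq_emit]
  by_cases hn : n ≤ 0
  · rw [pvRoots_eq_nil n 10 1 (by omega) (by push_cast; omega),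
      show n.toNat = 0 by omega]
    rfl
  · have hlen := pvRootsLength n (by omega)
    have hchain := pvRootsChain n 9 1 (by omega) (by omega) (by omega)
      (by push_cast; omega) 0
    rw [Nat.add_zero] at hchain
    simp only [Nat.cast_one] at hchain
    rw [hlen] at hchain
    rw [hchain]
    simp [pvEmit]

-- ===== VERDICT (by name: the statement is the Claim_ definition above) =====
theorem lexicalOrder3_spec : Claim_equal_lexicalOrder3 := by
  intro n _
  unfold Spec_lexicalOrder3
  exact pvMain n
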